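-- pv_equiv track=rewrite | github.com/jamesbting/interview-prep | leetcode/2658/solution.py | findMaxFish
-- ===== SOURCE A (Python) =====
-- from typing import List
--
-- from collections import deque
--
-- def findMaxFish(grid: List[List[int]]) -> int:
--     m = len(grid)
--     n = len(grid[0])
--     directions = [
--         (0,1),
--         (0,-1),
--         (1,0),
--         (-1,0),
--     ]
--     visited = [[grid[i][j] == 0 for j in range(n)] for i in range(m)]
--     max_fish = 0
--
--     #over all the islands of fish
--     for i in range(m):
--         for j in range(n):
--             if not visited[i][j]:
--                 #find the number of fish in this island
--                 curr_fish = 0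
--                 q = deque([(i,j)])
--                 while q:
--
--                     x, y = q.popleft()
--                     if visited[x][y]:
--                         continue
--                     curr_fish += grid[x][y]
--                     visited[x][y] = True
--
--                     for dx, dy in directions:
--                         if 0 <= x + dx < m and 0 <= y + dy < n and not visited[x + dx][y + dy]:
--                             q.append((x + dx, y + dy))
--
--                 max_fish = max(max_fish, curr_fish)
--     return max_fish
-- ===== SOURCE B (Python) =====
-- def findMaxFish(grid):
--     # Union-Find over flattened cell indices instead of a BFS flood fill:
--     # union every water cell with its right/down water neighbour, then
--     # aggregate each cell's value per root and take the largest component sum.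
--     m = len(grid)
--     n = len(grid[0])
--     parent = list(range(m * n))
--
--     def find(x):
--         while parent[x] != x:
--             x = parent[x]
--         return x
--
--     def union(a, b):
--         ra, rb = find(a), find(b)
--         if ra < rb:
--             parent[ra] = rb
--         elif rb < ra:
--             parent[rb] = ra
--
--     for i in range(m):
--         for j in range(n):
--             if grid[i][j] != 0:
--                 if i + 1 < m and grid[i + 1][j] != 0:
--                     union(i * n + j, (i + 1) * n + j)
--                 if j + 1 < n and grid[i][j + 1] != 0:
--                     union(i * n + j, i * n + j + 1)
--
--     sums = {}
--     for i in range(m):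
--         for j in range(n):
--             if grid[i][j] != 0:
--                 r = find(i * n + j)
--                 sums[r] = sums.get(r, 0) + grid[i][j]
--
--     best = 0
--     for s in sums.values():
--         best = max(best, s)
--     return best
-- ===== Notes on version B (the rewrite author's own statement) =====
-- stated objective: alternative
-- what changed: Replaces the BFS flood fill (deque + visited matrix) by a Union-Find over flattened cell indices: water cells are unioned with their right/down water neighbours, then one scan accumulates each cell's value into a dict keyed by its root and the largest accumulated component sum is returned.
import Mathlib
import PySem

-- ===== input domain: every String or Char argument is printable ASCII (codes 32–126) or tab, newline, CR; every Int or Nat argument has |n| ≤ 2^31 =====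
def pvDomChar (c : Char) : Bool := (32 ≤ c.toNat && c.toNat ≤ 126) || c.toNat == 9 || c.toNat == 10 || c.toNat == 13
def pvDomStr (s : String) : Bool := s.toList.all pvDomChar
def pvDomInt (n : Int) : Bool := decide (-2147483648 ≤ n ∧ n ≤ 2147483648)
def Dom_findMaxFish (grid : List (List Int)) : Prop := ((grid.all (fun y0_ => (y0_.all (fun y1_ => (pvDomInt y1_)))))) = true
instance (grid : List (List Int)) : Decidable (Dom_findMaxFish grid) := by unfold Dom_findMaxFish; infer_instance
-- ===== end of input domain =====

-- B replaces A's BFS flood fill (deque + visited matrix) by a Union-Find over flattened cell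
-- indices with per-root sum aggregation (alternative algorithm; return values proved equal on Pre_).

-- ===== PORT A =====
-- directions list of A
def pvDirs : List (Int × Int) := [(0, 1), (0, -1), (1, 0), (-1, 0)]

-- grid[x][y]; exact within Pre_ (A only indexes with 0 ≤ x < m, 0 ≤ y < n ≤ row length)
def pvGetI (g : List (List Int)) (x y : Int) : Int := (g.getD x.toNat []).getD y.toNat 0

-- visited[x][y]; exact within Pre_ (A only reads in-range non-negative indices)
def pvVGet (v : List (List Bool)) (x y : Int) : Bool := (v.getD x.toNat []).getD y.toNat true

-- visited[x][y] = True
def pvVSet (v : List (List Bool)) (x y : Int) : List (List Bool) :=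
  v.set x.toNat ((v.getD x.toNat []).set y.toNat true)

-- number of False entries (termination measure for the BFS loop)
def pvCountFalse (v : List (List Bool)) : Nat := (v.map (fun r => r.countP (fun b => !b))).sum

lemma pvCountFalse_row_set_lt (r : List Bool) (j : Nat) (hj : r.getD j true = false) :
    (r.set j true).countP (fun b => !b) < r.countP (fun b => !b) := by
  induction r generalizing j with
  | nil => simp at hj
  | cons b t ih =>
    cases j with
    | zero => simp_all
    | succ j =>
      simp only [List.getD_cons_succ] at hj
      simpa [List.countP_cons] using ih j hj

lemma pvCountFalse_set_lt' (v : List (List Bool)) (i j : Nat)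
    (h : (v.getD i []).getD j true = false) :
    pvCountFalse (v.set i ((v.getD i []).set j true)) < pvCountFalse v := by
  induction v generalizing i with
  | nil => simp [List.getD] at h
  | cons r t ih =>
    cases i with
    | zero =>
      simp only [List.getD_cons_zero] at h ⊢
      have := pvCountFalse_row_set_lt r j h
      simp only [pvCountFalse, List.set_cons_zero, List.map_cons, List.sum_cons]
      omega
    | succ k =>
      simp only [List.getD_cons_succ] at h ⊢
      have := ih k h
      simp only [pvCountFalse, List.map_cons, List.sum_cons, List.set_cons_succ] at this ⊢
      omega

lemma pvCountFalse_set_lt (v : List (List Bool)) (x y : Int)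
    (h : pvVGet v x y = false) : pvCountFalse (pvVSet v x y) < pvCountFalse v :=
  pvCountFalse_set_lt' v x.toNat y.toNat h

-- the BFS while-loop of A: queue of cells, popleft; returns (curr_fish, visited)
def pvBFS (g : List (List Int)) (m n : Int) (v : List (List Bool))
    (q : List (Int × Int)) (acc : Int) : Int × List (List Bool) :=
  match q with
  | [] => (acc, v)
  | (x, y) :: q' =>
    if h : pvVGet v x y then pvBFS g m n v q' acc
    else
      let v' := pvVSet v x y
      let acc' := acc + pvGetI g x y
      let pushes := pvDirs.filterMap (fun d =>
        if 0 ≤ x + d.1 ∧ x + d.1 < m ∧ 0 ≤ y + d.2 ∧ y + d.2 < n ∧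
            pvVGet v' (x + d.1) (y + d.2) = false
        then some (x + d.1, y + d.2) else none)
      pvBFS g m n v' (q' ++ pushes) acc'
termination_by (pvCountFalse v, q.length)
decreasing_by
  · exact Prod.Lex.right _ (Nat.lt_succ_self _)
  · exact Prod.Lex.left _ _ (pvCountFalse_set_lt v x y (by simpa using h))

-- A: nested loops over range(m) × range(n), shared visited matrix, running max
def findMaxFish (grid : List (List Int)) : Int :=
  let m := grid.length
  let n := (grid.headD []).length
  let visited0 := (List.range m).map (fun (i : Nat) =>
    (List.range n).map (fun (j : Nat) => pvGetI grid (i : Int) (j : Int) == 0))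
  let st := (List.range m).foldl (fun (st : Int × List (List Bool)) (i : Nat) =>
    (List.range n).foldl (fun st (j : Nat) =>
      if pvVGet st.2 (i : Int) (j : Int) then st
      else
        let res := pvBFS grid (m : Int) (n : Int) st.2 [((i : Int), (j : Int))] 0
        (max st.1 res.1, res.2)) st) (0, visited0)
  st.1

-- ===== PORT B =====
-- B's find: 'while parent[x] != x: x = parent[x]'. The loop is run with fuel parent.length,
-- which is exact here: union keeps every non-root parent pointer strictly above its index,
-- so a chain takes at most parent.length steps (proved below as pvUFInv).
def ufFind (parent : List Int) : Nat → Int → Int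
  | 0, x => x
  | fuel + 1, x =>
    let p := parent.getD x.toNat x
    if p ≠ x then ufFind parent fuel p else x

-- B's union: point the smaller root at the larger one
def ufUnion (parent : List Int) (a b : Int) : List Int :=
  let ra := ufFind parent parent.length a
  let rb := ufFind parent parent.length b
  if ra < rb then parent.set ra.toNat rb
  else if rb < ra then parent.set rb.toNat ra
  else parent

-- B: union right/down water neighbours, then aggregate per root into a dict, then max of sums
def findMaxFish_alt (grid : List (List Int)) : Int :=
  let m := grid.length
  let n := (grid.headD []).length
  let parent0 : List Int := (List.range (m * n)).map (fun (k : Nat) => (k : Int))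
  let parent := (List.range m).foldl (fun par (i : Nat) =>
    (List.range n).foldl (fun par (j : Nat) =>
      if pvGetI grid (i : Int) (j : Int) ≠ 0 then
        let par1 := if (i : Int) + 1 < (m : Int) ∧ pvGetI grid ((i : Int) + 1) (j : Int) ≠ 0
          then ufUnion par ((i : Int) * (n : Int) + (j : Int)) (((i : Int) + 1) * (n : Int) + (j : Int)) else par
        if (j : Int) + 1 < (n : Int) ∧ pvGetI grid (i : Int) ((j : Int) + 1) ≠ 0
          then ufUnion par1 ((i : Int) * (n : Int) + (j : Int)) ((i : Int) * (n : Int) + (j : Int) + 1) else par1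
      else par) par) parent0
  let sums := (List.range m).foldl (fun (d : PySem.Dict Int Int) (i : Nat) =>
    (List.range n).foldl (fun d (j : Nat) =>
      if pvGetI grid (i : Int) (j : Int) ≠ 0 then
        let r := ufFind parent parent.length ((i : Int) * (n : Int) + (j : Int))
        d.insert r (d.getD r 0 + pvGetI grid (i : Int) (j : Int))
      else d) d) PySem.Dict.empty
  sums.values.foldl (fun best s => max best s) 0

-- ===== PRECONDITION & SPEC =====
-- Pre_ excludes exactly the inputs where Python A raises: the empty grid (grid[0] IndexError)
-- and grids with a row shorter than the first row (IndexError while building visited).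
def Pre_findMaxFish (grid : List (List Int)) : Prop :=
  grid ≠ [] ∧ ∀ r ∈ grid, (grid.headD []).length ≤ r.length

instance (grid : List (List Int)) : Decidable (Pre_findMaxFish grid) := by
  unfold Pre_findMaxFish; infer_instance

def pvWitness_findMaxFish : List (List Int) := [[1, 0, 2], [0, 3, 4]]

def Spec_findMaxFish (grid : List (List Int)) (out : Int) : Prop := out = findMaxFish_alt grid
instance (grid : List (List Int)) (out : Int) : Decidable (Spec_findMaxFish grid out) := by
  unfold Spec_findMaxFish; infer_instance

-- ===== CLAIM (what is proved, stated in full; the proofs are below) =====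
def Claim_equal_findMaxFish : Prop := ∀ (grid : List (List Int)), Dom_findMaxFish grid →
  Pre_findMaxFish grid → Spec_findMaxFish grid (findMaxFish grid)

-- ===== LEMMAS AND PROOFS =====

-- ---- proof-layer vocabulary ----
abbrev pvM (g : List (List Int)) : Int := (g.length : Int)
abbrev pvN (g : List (List Int)) : Int := ((g.headD []).length : Int)
abbrev pvInB (g : List (List Int)) (c : Int × Int) : Prop :=
  0 ≤ c.1 ∧ c.1 < pvM g ∧ 0 ≤ c.2 ∧ c.2 < pvN g
abbrev pvW (g : List (List Int)) (c : Int × Int) : Prop :=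
  pvInB g c ∧ pvGetI g c.1 c.2 ≠ 0

def pvAdj (g : List (List Int)) (c d : Int × Int) : Prop :=
  pvW g c ∧ pvW g d ∧ ∃ dd ∈ pvDirs, d = (c.1 + dd.1, c.2 + dd.2)

def pvReach (g : List (List Int)) : (Int × Int) → (Int × Int) → Prop :=
  Relation.ReflTransGen (pvAdj g)

noncomputable def pvCells (g : List (List Int)) : Finset (Int × Int) :=
  Finset.Icc (0, 0) (pvM g - 1, pvN g - 1)

noncomputable def pvCompF (g : List (List Int)) (c : Int × Int) : Finset (Int × Int) :=
  letI := Classical.decPred (pvReach g c); (pvCells g).filter (pvReach g c)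

noncomputable def pvF (g : List (List Int)) (c : Int × Int) : Int :=
  ∑ d ∈ pvCompF g c, pvGetI g d.1 d.2

def pvShape (g : List (List Int)) (v : List (List Bool)) : Prop :=
  v.length = g.length ∧ ∀ r ∈ v, r.length = (g.headD []).length

def pvAdjU (g : List (List Int)) (v : List (List Bool)) (a b : Int × Int) : Prop :=
  pvAdj g a b ∧ pvVGet v a.1 a.2 = false ∧ pvVGet v b.1 b.2 = false

def pvReachU (g : List (List Int)) (v : List (List Bool)) : (Int × Int) → (Int × Int) → Prop :=
  Relation.ReflTransGen (pvAdjU g v)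

noncomputable def pvDFin (g : List (List Int)) (v : List (List Bool)) (q : List (Int × Int)) :
    Finset (Int × Int) :=
  letI := Classical.decPred (fun d => pvVGet v d.1 d.2 = false ∧ ∃ e ∈ q, pvReachU g v e d)
  (pvCells g).filter (fun d => pvVGet v d.1 d.2 = false ∧ ∃ e ∈ q, pvReachU g v e d)

def pvCellsList (m n : Nat) : List (Int × Int) :=
  (List.range m).flatMap (fun (i : Nat) =>
    (List.range n).map (fun (j : Nat) => ((i : Int), (j : Int))))

noncomputable def pvSimple (g : List (List Int)) (cs : List (Int × Int)) (acc : Int) : Int :=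
  cs.foldl (fun acc c => if pvW g c then max acc (pvF g c) else acc) acc

def pvAStep (g : List (List Int)) (st : Int × List (List Bool)) (c : Int × Int) :
    Int × List (List Bool) :=
  if pvVGet st.2 c.1 c.2 then st
  else
    let res := pvBFS g (pvM g) (pvN g) st.2 [c] 0
    (max st.1 res.1, res.2)

def pvVis0 (g : List (List Int)) : List (List Bool) :=
  (List.range g.length).map (fun (i : Nat) =>
    (List.range (g.headD []).length).map (fun (j : Nat) => pvGetI g (i : Int) (j : Int) == 0))

-- ---- membership basics ----
lemma mem_pvCells (g : List (List Int)) (c : Int × Int) : c ∈ pvCells g ↔ pvInB g c := by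
  unfold pvCells
  rw [Finset.mem_Icc]
  simp only [Prod.le_def]
  constructor
  · rintro ⟨⟨h1, h2⟩, h3, h4⟩; exact ⟨h1, by omega, h2, by omega⟩
  · rintro ⟨h1, h2, h3, h4⟩; exact ⟨⟨h1, h3⟩, by omega, by omega⟩

lemma mem_pvCompF (g : List (List Int)) (c d : Int × Int) :
    d ∈ pvCompF g c ↔ pvInB g d ∧ pvReach g c d := by
  have h := @Finset.mem_filter _ (pvReach g c) (Classical.decPred _) (pvCells g) d
  unfold pvCompF
  rw [h, mem_pvCells]

lemma mem_pvDFin (g : List (List Int)) (v : List (List Bool)) (q : List (Int × Int))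
    (d : Int × Int) :
    d ∈ pvDFin g v q ↔ pvInB g d ∧ pvVGet v d.1 d.2 = false ∧ ∃ e ∈ q, pvReachU g v e d := by
  have h := @Finset.mem_filter _
    (fun d => pvVGet v d.1 d.2 = false ∧ ∃ e ∈ q, pvReachU g v e d)
    (Classical.decPred _) (pvCells g) d
  unfold pvDFin
  rw [h, mem_pvCells]

lemma mem_pvCellsList (m n : Nat) (c : Int × Int) :
    c ∈ pvCellsList m n ↔ 0 ≤ c.1 ∧ c.1 < (m : Int) ∧ 0 ≤ c.2 ∧ c.2 < (n : Int) := by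
  constructor
  · intro h
    rw [pvCellsList, List.mem_flatMap] at h
    obtain ⟨i, hi, hc⟩ := h
    rw [List.mem_range] at hi
    rw [List.mem_map] at hc
    obtain ⟨j, hj, rfl⟩ := hc
    rw [List.mem_range] at hj
    dsimp only
    omega
  · intro h
    rw [pvCellsList, List.mem_flatMap]
    refine ⟨c.1.toNat, ?_, ?_⟩
    · rw [List.mem_range]; omega
    · rw [List.mem_map]
      refine ⟨c.2.toNat, ?_, ?_⟩
      · rw [List.mem_range]; omega
      · rw [Prod.ext_iff]; dsimp only; constructor <;> omega

-- ---- graph basics ----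
lemma pvAdj_symm (g : List (List Int)) {c d : Int × Int} (h : pvAdj g c d) : pvAdj g d c := by
  obtain ⟨hc, hd, dd, hdd, rfl⟩ := h
  simp only [pvDirs, List.mem_cons, List.not_mem_nil, or_false] at hdd
  rcases hdd with rfl|rfl|rfl|rfl
  · exact ⟨hd, hc, (0, -1), by simp [pvDirs], by rw [Prod.ext_iff]; dsimp only; constructor <;> omega⟩
  · exact ⟨hd, hc, (0, 1), by simp [pvDirs], by rw [Prod.ext_iff]; dsimp only; constructor <;> omega⟩
  · exact ⟨hd, hc, (-1, 0), by simp [pvDirs], by rw [Prod.ext_iff]; dsimp only; constructor <;> omega⟩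
  · exact ⟨hd, hc, (1, 0), by simp [pvDirs], by rw [Prod.ext_iff]; dsimp only; constructor <;> omega⟩

lemma pvReach_W (g : List (List Int)) {c d : Int × Int} (hc : pvW g c)
    (h : pvReach g c d) : pvW g d := by
  induction h with
  | refl => exact hc
  | tail _ h2 _ => exact h2.2.1

lemma pvReach_symm (g : List (List Int)) {c d : Int × Int} (h : pvReach g c d) :
    pvReach g d c := by
  exact Relation.ReflTransGen.symmetric (fun a b hab => pvAdj_symm g hab) h

lemma pvCompF_eq_of_reach (g : List (List Int)) {c d : Int × Int} (h : pvReach g c d) :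
    pvCompF g d = pvCompF g c := by
  apply Finset.ext
  intro x
  rw [mem_pvCompF, mem_pvCompF]
  constructor
  · rintro ⟨hi, hr⟩; exact ⟨hi, h.trans hr⟩
  · rintro ⟨hi, hr⟩; exact ⟨hi, (pvReach_symm g h).trans hr⟩

lemma pvF_eq_of_reach (g : List (List Int)) {c d : Int × Int} (h : pvReach g c d) :
    pvF g d = pvF g c := by
  unfold pvF
  rw [pvCompF_eq_of_reach g h]

lemma pvGetD_set {α : Type} (l : List α) (i k : Nat) (x d : α) :
    (l.set i x).getD k d = if i = k ∧ i < l.length then x else l.getD k d := by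
  split_ifs with h
  · obtain ⟨rfl, hl⟩ := h
    simp [List.getD_eq_getElem?_getD, List.getElem?_set, hl]
  · rcases not_and_or.mp h with h1 | h2
    · simp [List.getD_eq_getElem?_getD, List.getElem?_set, h1]
    · rw [List.set_eq_of_length_le (by omega)]

lemma pvVGet_pvVSet_eq (v : List (List Bool)) (x y a b : Int) :
    pvVGet (pvVSet v x y) a b =
      if x.toNat = a.toNat ∧ x.toNat < v.length ∧ y.toNat = b.toNat ∧
          y.toNat < (v.getD x.toNat []).length then true
      else pvVGet v a b := by
  unfold pvVGet pvVSet
  rw [pvGetD_set]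
  by_cases h1 : x.toNat = a.toNat ∧ x.toNat < v.length
  · rw [if_pos h1, pvGetD_set]
    obtain ⟨hxa, hxl⟩ := h1
    by_cases h2 : y.toNat = b.toNat ∧ y.toNat < (v.getD x.toNat []).length
    · rw [if_pos h2, if_pos ⟨hxa, hxl, h2.1, h2.2⟩]
    · rw [if_neg h2, if_neg (by tauto), hxa]
  · rw [if_neg h1, if_neg (by tauto)]

-- ---- visited-matrix basics ----
lemma pvShape_pvVSet (g : List (List Int)) (v : List (List Bool)) (x y : Int)
    (h : pvShape g v) : pvShape g (pvVSet v x y) := by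
  obtain ⟨hl, hr⟩ := h
  constructor
  · rw [pvVSet, List.length_set]; exact hl
  · intro r hmem
    by_cases hx : x.toNat < v.length
    · rcases List.mem_or_eq_of_mem_set hmem with h1 | rfl
      · exact hr r h1
      · rw [List.length_set]
        have hg : v.getD x.toNat [] = v[x.toNat] := List.getD_eq_getElem v [] hx
        rw [hg]
        exact hr _ (List.getElem_mem hx)
    · rw [pvVSet, List.set_eq_of_length_le (by omega)] at hmem
      exact hr r hmem

lemma pvVGet_pvVSet_true (v : List (List Bool)) (x y a b : Int)
    (h : pvVGet v a b = true) : pvVGet (pvVSet v x y) a b = true := by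
  rw [pvVGet_pvVSet_eq]
  split_ifs with hh
  · rfl
  · exact h

lemma pvVGet_pvVSet_false (v : List (List Bool)) (x y a b : Int)
    (h : pvVGet (pvVSet v x y) a b = false) : pvVGet v a b = false := by
  rw [pvVGet_pvVSet_eq] at h
  split_ifs at h with hh
  exact h

lemma pvVGet_pvVSet_ne (v : List (List Bool)) (x y a b : Int)
    (h : x.toNat ≠ a.toNat ∨ y.toNat ≠ b.toNat) :
    pvVGet (pvVSet v x y) a b = pvVGet v a b := by
  rw [pvVGet_pvVSet_eq, if_neg (by tauto)]

lemma pvVGet_pvVSet_self (g : List (List Int)) (v : List (List Bool)) (x y : Int)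
    (hs : pvShape g v) (hin : pvInB g (x, y)) : pvVGet (pvVSet v x y) x y = true := by
  rw [pvVGet_pvVSet_eq]
  have hx : x.toNat < v.length := by
    have := hs.1
    rcases hin with ⟨h1, h2, h3, h4⟩
    simp only [pvM] at h2
    omega
  have hg : v.getD x.toNat [] = v[x.toNat] := List.getD_eq_getElem v [] hx
  have hrow : (v.getD x.toNat []).length = (g.headD []).length := by
    rw [hg]; exact hs.2 _ (List.getElem_mem hx)
  rw [if_pos ?_]
  refine ⟨rfl, hx, rfl, ?_⟩
  rw [hrow]
  rcases hin with ⟨h1, h2, h3, h4⟩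
  simp only [pvN] at h4
  omega

lemma pvVGet_pvVSet_ne' (g : List (List Int)) (v : List (List Bool)) (x y : Int)
    (e : Int × Int) (hc : pvInB g (x, y)) (he : pvInB g e) (hne : e ≠ (x, y)) :
    pvVGet (pvVSet v x y) e.1 e.2 = pvVGet v e.1 e.2 := by
  apply pvVGet_pvVSet_ne
  rcases he with ⟨he1, _, he3, _⟩
  rcases hc with ⟨hc1, _, hc3, _⟩
  by_contra hcon
  push_neg at hcon
  exact hne (Prod.ext (by omega) (by omega))

lemma pvVGet_pvVSet_iff (g : List (List Int)) (v : List (List Bool)) (x y : Int)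
    (e : Int × Int) (hs : pvShape g v) (hc : pvInB g (x, y)) (he : pvInB g e) :
    (pvVGet (pvVSet v x y) e.1 e.2 = true ↔ pvVGet v e.1 e.2 = true ∨ e = (x, y)) := by
  by_cases hec : e = (x, y)
  · rw [hec]
    exact iff_of_true (by exact pvVGet_pvVSet_self g v x y hs hc) (Or.inr rfl)
  · rw [pvVGet_pvVSet_ne' g v x y e hc he hec]
    simp [hec]

-- ---- A-side: the BFS loop ----
lemma pvReachU_mono (g : List (List Int)) (v : List (List Bool)) (x y : Int)
    {e d : Int × Int} (h : pvReachU g (pvVSet v x y) e d) : pvReachU g v e d := by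
  unfold pvReachU at h ⊢
  induction h with
  | refl => exact Relation.ReflTransGen.refl
  | tail _ h2 ih =>
    exact Relation.ReflTransGen.tail ih
      ⟨h2.1, pvVGet_pvVSet_false v x y _ _ h2.2.1, pvVGet_pvVSet_false v x y _ _ h2.2.2⟩

lemma pvReachU_of_visited (g : List (List Int)) (v : List (List Bool)) {e d : Int × Int}
    (hv : pvVGet v e.1 e.2 = true) (h : pvReachU g v e d) : d = e := by
  unfold pvReachU at h
  rcases Relation.ReflTransGen.cases_head h with h1 | ⟨a, hstep, _⟩
  · exact h1.symm
  · exact absurd hstep.2.1 (by simp [hv])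

lemma pvLift (g : List (List Int)) (v : List (List Bool)) (x y : Int)
    (hs : pvShape g v) (hcIn : pvInB g (x, y)) :
    ∀ e d : Int × Int, pvReachU g v e d → d ≠ (x, y) →
      pvReachU g (pvVSet v x y) e d ∨
        ∃ w, pvAdj g (x, y) w ∧ pvVGet (pvVSet v x y) w.1 w.2 = false ∧
          pvReachU g (pvVSet v x y) w d := by
  intro e d hed hdc
  unfold pvReachU at hed
  induction hed using Relation.ReflTransGen.head_induction_on with
  | refl => exact Or.inl Relation.ReflTransGen.refl
  | @head a mid hstep htail ih =>
    rcases ih with hrd | hex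
    · by_cases hmidc : mid = (x, y)
      · subst hmidc
        have hvc : pvVGet (pvVSet v x y) x y = true := pvVGet_pvVSet_self g v x y hs hcIn
        exact absurd (pvReachU_of_visited g _ (by exact hvc) hrd) hdc
      · have hmidf : pvVGet (pvVSet v x y) mid.1 mid.2 = false := by
          rw [pvVGet_pvVSet_ne' g v x y mid hcIn hstep.1.2.1.1 hmidc]
          exact hstep.2.2
        by_cases hac : a = (x, y)
        · exact Or.inr ⟨mid, (by rw [← hac]; exact hstep.1), hmidf, hrd⟩
        · have haf : pvVGet (pvVSet v x y) a.1 a.2 = false := by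
            rw [pvVGet_pvVSet_ne' g v x y a hcIn hstep.1.1.1 hac]
            exact hstep.2.1
          exact Or.inl (Relation.ReflTransGen.head ⟨hstep.1, haf, hmidf⟩ hrd)
    · exact Or.inr hex

lemma pvBFS_nil (g : List (List Int)) (m n : Int) (v : List (List Bool)) (acc : Int) :
    pvBFS g m n v [] acc = (acc, v) := by
  rw [pvBFS]

lemma pvBFS_cons_visited (g : List (List Int)) (m n : Int) (v : List (List Bool))
    (x y : Int) (q' : List (Int × Int)) (acc : Int) (h : pvVGet v x y = true) :
    pvBFS g m n v ((x, y) :: q') acc = pvBFS g m n v q' acc := by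
  rw [pvBFS]
  simp [h]

lemma pvBFS_cons_unvisited (g : List (List Int)) (m n : Int) (v : List (List Bool))
    (x y : Int) (q' : List (Int × Int)) (acc : Int) (h : pvVGet v x y = false) :
    pvBFS g m n v ((x, y) :: q') acc =
      pvBFS g m n (pvVSet v x y)
        (q' ++ pvDirs.filterMap (fun d =>
          if 0 ≤ x + d.1 ∧ x + d.1 < m ∧ 0 ≤ y + d.2 ∧ y + d.2 < n ∧
              pvVGet (pvVSet v x y) (x + d.1) (y + d.2) = false
          then some (x + d.1, y + d.2) else none))
        (acc + pvGetI g x y) := by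
  rw [pvBFS]
  simp [h]

lemma mem_pvBFS_pushes (g : List (List Int)) (v' : List (List Bool)) (x y : Int)
    (w : Int × Int) :
    w ∈ pvDirs.filterMap (fun d =>
        if 0 ≤ x + d.1 ∧ x + d.1 < pvM g ∧ 0 ≤ y + d.2 ∧ y + d.2 < pvN g ∧
            pvVGet v' (x + d.1) (y + d.2) = false
        then some (x + d.1, y + d.2) else none) ↔
      pvInB g w ∧ pvVGet v' w.1 w.2 = false ∧ ∃ dd ∈ pvDirs, w = (x + dd.1, y + dd.2) := by
  simp only [List.mem_filterMap, Option.ite_none_right_eq_some, Option.some.injEq]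
  constructor
  · rintro ⟨dd, hdd, ⟨hh1, hh2, hh3, hh4, hh5⟩, rfl⟩
    exact ⟨⟨hh1, hh2, hh3, hh4⟩, hh5, dd, hdd, rfl⟩
  · rintro ⟨⟨hh1, hh2, hh3, hh4⟩, hh5, dd, hdd, rfl⟩
    exact ⟨dd, hdd, ⟨hh1, hh2, hh3, hh4, hh5⟩, rfl⟩

lemma pvDFin_cons_visited (g : List (List Int)) (v : List (List Bool)) (x y : Int)
    (q' : List (Int × Int)) (hv : pvVGet v x y = true) :
    pvDFin g v ((x, y) :: q') = pvDFin g v q' := by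
  apply Finset.ext
  intro d
  rw [mem_pvDFin, mem_pvDFin]
  constructor
  · rintro ⟨h1, h2, e, he, hr⟩
    rcases List.mem_cons.mp he with rfl | he'
    · have hde := pvReachU_of_visited g v (by exact hv) hr
      rw [hde] at h2
      exact absurd h2 (by simp [hv])
    · exact ⟨h1, h2, e, he', hr⟩
  · rintro ⟨h1, h2, e, he, hr⟩
    exact ⟨h1, h2, e, List.mem_cons_of_mem _ he, hr⟩

lemma pvDFin_step (g : List (List Int)) (v : List (List Bool)) (x y : Int)
    (q' P : List (Int × Int)) (hs : pvShape g v)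
    (hnw : ∀ e, pvInB g e → ¬ pvW g e → pvVGet v e.1 e.2 = true)
    (hcIn : pvInB g (x, y)) (hcv : pvVGet v x y = false)
    (hP : ∀ w, w ∈ P ↔ pvInB g w ∧ pvVGet (pvVSet v x y) w.1 w.2 = false ∧
        ∃ dd ∈ pvDirs, w = (x + dd.1, y + dd.2)) :
    pvDFin g v ((x, y) :: q') = insert (x, y) (pvDFin g (pvVSet v x y) (q' ++ P)) ∧
      (x, y) ∉ pvDFin g (pvVSet v x y) (q' ++ P) := by
  have hvc : pvVGet (pvVSet v x y) x y = true := pvVGet_pvVSet_self g v x y hs hcIn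
  have hWc : pvW g (x, y) := by
    refine ⟨hcIn, ?_⟩
    by_contra hz
    exact absurd (hnw (x, y) hcIn (fun hw => hw.2 hz)) (by simp [hcv])
  constructor
  · apply Finset.ext
    intro d
    rw [Finset.mem_insert, mem_pvDFin, mem_pvDFin]
    constructor
    · rintro ⟨hInB, hdf, e, he, hr⟩
      by_cases hdc : d = (x, y)
      · exact Or.inl hdc
      · right
        refine ⟨hInB, ?_, ?_⟩
        · rw [pvVGet_pvVSet_ne' g v x y d hcIn hInB hdc]
          exact hdf
        · rcases pvLift g v x y hs hcIn e d hr hdc with h1 | ⟨w, hw1, hw2, hw3⟩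
          · refine ⟨e, List.mem_append_left _ ?_, h1⟩
            rcases List.mem_cons.mp he with rfl | he'
            · exact absurd (pvReachU_of_visited g _ (by exact hvc) h1) hdc
            · exact he'
          · exact ⟨w, List.mem_append_right _ ((hP w).mpr ⟨hw1.2.1.1, hw2, hw1.2.2⟩), hw3⟩
    · intro hcase
      rcases hcase with rfl | ⟨hInB, hdf, e, he, hr⟩
      · exact ⟨hcIn, hcv, (x, y), List.mem_cons_self, Relation.ReflTransGen.refl⟩
      · refine ⟨hInB, pvVGet_pvVSet_false v x y d.1 d.2 hdf, ?_⟩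
        rcases List.mem_append.mp he with he' | heP
        · exact ⟨e, List.mem_cons_of_mem _ he', pvReachU_mono g v x y hr⟩
        · obtain ⟨hwInB, hwf, dd, hdd, rfl⟩ := (hP e).mp heP
          have hef : pvVGet v (x + dd.1) (y + dd.2) = false :=
            pvVGet_pvVSet_false v x y _ _ hwf
          have hWe : pvW g (x + dd.1, y + dd.2) := by
            refine ⟨hwInB, ?_⟩
            by_contra hz
            exact absurd (hnw _ hwInB (fun hw => hw.2 hz)) (by simp [hef])
          exact ⟨(x, y), List.mem_cons_self,
            Relation.ReflTransGen.head ⟨⟨hWc, hWe, dd, hdd, rfl⟩, hcv, hef⟩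
              (pvReachU_mono g v x y hr)⟩
  · intro hmem
    rw [mem_pvDFin] at hmem
    exact absurd hmem.2.1 (by simp [hvc])

set_option maxHeartbeats 1000000 in
lemma pvBFS_spec (g : List (List Int)) :
    ∀ (v : List (List Bool)) (q : List (Int × Int)) (acc : Int),
      pvShape g v →
      (∀ e, pvInB g e → ¬ pvW g e → pvVGet v e.1 e.2 = true) →
      (∀ e ∈ q, pvInB g e) →
      (pvBFS g (pvM g) (pvN g) v q acc).1 =
          acc + ∑ d ∈ pvDFin g v q, pvGetI g d.1 d.2 ∧
        pvShape g (pvBFS g (pvM g) (pvN g) v q acc).2 ∧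
        ∀ e, pvInB g e →
          (pvVGet (pvBFS g (pvM g) (pvN g) v q acc).2 e.1 e.2 = true ↔
            pvVGet v e.1 e.2 = true ∨ e ∈ pvDFin g v q) := by
  intro v q acc
  induction v, q, acc using pvBFS.induct g (pvM g) (pvN g) with
  | case1 v acc =>
    intro hs hnw hq
    have hD : pvDFin g v [] = ∅ := by
      apply Finset.eq_empty_iff_forall_notMem.mpr
      intro d hd
      rw [mem_pvDFin] at hd
      obtain ⟨_, _, e, he, _⟩ := hd
      simp at he
    rw [pvBFS_nil, hD]
    refine ⟨by simp, hs, ?_⟩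
    intro e _
    simp
  | case2 v acc x y q' h ih =>
    intro hs hnw hq
    rw [pvBFS_cons_visited g _ _ v x y q' acc h,
      pvDFin_cons_visited g v x y q' h]
    exact ih hs hnw (fun e he => hq e (List.mem_cons_of_mem _ he))
  | case3 v acc x y q' h hveq hacceq hpusheq ih =>
    intro hs hnw hq
    have hcv : pvVGet v x y = false := by simpa using h
    have hcIn : pvInB g (x, y) := hq (x, y) List.mem_cons_self
    set v' := pvVSet v x y with hv'
    set P := pvDirs.filterMap (fun d =>
        if 0 ≤ x + d.1 ∧ x + d.1 < pvM g ∧ 0 ≤ y + d.2 ∧ y + d.2 < pvN g ∧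
            pvVGet v' (x + d.1) (y + d.2) = false
        then some (x + d.1, y + d.2) else none) with hPdef
    have hP : ∀ w, w ∈ P ↔ pvInB g w ∧ pvVGet v' w.1 w.2 = false ∧
        ∃ dd ∈ pvDirs, w = (x + dd.1, y + dd.2) := by
      rw [hPdef]
      exact fun w => mem_pvBFS_pushes g v' x y w
    obtain ⟨hDeq, hDnm⟩ := pvDFin_step g v x y q' P hs hnw hcIn hcv (by rw [hv'] at hP; exact hP)
    have hs' : pvShape g v' := pvShape_pvVSet g v x y hs
    have hnw' : ∀ e, pvInB g e → ¬ pvW g e → pvVGet v' e.1 e.2 = true :=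
      fun e he hw => pvVGet_pvVSet_true v x y e.1 e.2 (hnw e he hw)
    have hq' : ∀ e ∈ q' ++ P, pvInB g e := by
      intro e he
      rcases List.mem_append.mp he with he' | heP
      · exact hq e (List.mem_cons_of_mem _ he')
      · exact ((hP e).mp heP).1
    have ihc := ih hs' hnw' (by exact hq')
    have ihsum : (pvBFS g (pvM g) (pvN g) v' (q' ++ P) (acc + pvGetI g x y)).1 =
        (acc + pvGetI g x y) + ∑ d ∈ pvDFin g v' (q' ++ P), pvGetI g d.1 d.2 := by
      exact ihc.1
    have ihshape : pvShape g (pvBFS g (pvM g) (pvN g) v' (q' ++ P) (acc + pvGetI g x y)).2 := by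
      exact ihc.2.1
    have ihvis : ∀ e, pvInB g e →
        (pvVGet (pvBFS g (pvM g) (pvN g) v' (q' ++ P) (acc + pvGetI g x y)).2 e.1 e.2 = true ↔
          pvVGet v' e.1 e.2 = true ∨ e ∈ pvDFin g v' (q' ++ P)) := by
      exact ihc.2.2
    have e1 : pvBFS g (pvM g) (pvN g) v ((x, y) :: q') acc =
        pvBFS g (pvM g) (pvN g) v' (q' ++ P) (acc + pvGetI g x y) := by
      rw [hPdef, hv']
      exact pvBFS_cons_unvisited g _ _ v x y q' acc hcv
    rw [e1]
    refine ⟨?_, ihshape, ?_⟩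
    · rw [ihsum, hDeq, Finset.sum_insert hDnm]
      dsimp only
      ring
    · intro e he
      rw [ihvis e he, hDeq, Finset.mem_insert, hv',
        pvVGet_pvVSet_iff g v x y e hs hcIn he]
      exact or_assoc

lemma pvDFin_single (g : List (List Int)) (v : List (List Bool)) (c : Int × Int)
    (hnw : ∀ e, pvInB g e → ¬ pvW g e → pvVGet v e.1 e.2 = true)
    (hcl : ∀ a b, pvInB g a → pvVGet v a.1 a.2 = true → pvAdj g a b →
      pvVGet v b.1 b.2 = true)
    (hc : pvInB g c) (hcv : pvVGet v c.1 c.2 = false) :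
    pvDFin g v [c] = pvCompF g c := by
  apply Finset.ext
  intro d
  rw [mem_pvDFin, mem_pvCompF]
  constructor
  · rintro ⟨h1, _, e, he, hr⟩
    rw [List.mem_singleton] at he
    subst he
    exact ⟨h1, Relation.ReflTransGen.mono (fun a b hab => hab.1) hr⟩
  · rintro ⟨h1, hr⟩
    have key : ∀ d', pvReach g c d' → pvVGet v d'.1 d'.2 = false ∧ pvReachU g v c d' := by
      intro d' hd'
      unfold pvReach at hd'
      induction hd' with
      | refl => exact ⟨hcv, Relation.ReflTransGen.refl⟩
      | @tail b d'' hpre hadj ih =>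
        obtain ⟨fa, ra⟩ := ih
        have fd : pvVGet v d''.1 d''.2 = false := by
          cases hval : pvVGet v d''.1 d''.2
          · rfl
          · exact absurd (hcl d'' b hadj.2.1.1 hval (pvAdj_symm g hadj)) (by simp [fa])
        exact ⟨fd, Relation.ReflTransGen.tail ra ⟨hadj, fa, fd⟩⟩
    obtain ⟨f1, r1⟩ := key d hr
    exact ⟨h1, f1, c, List.mem_singleton.mpr rfl, r1⟩

-- ---- A's outer loop ----
lemma foldA_eq_simple (g : List (List Int)) :
    ∀ (cs : List (Int × Int)) (acc : Int) (v : List (List Bool)),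
      (∀ c ∈ cs, pvInB g c) → pvShape g v →
      (∀ e, pvInB g e → ¬ pvW g e → pvVGet v e.1 e.2 = true) →
      (∀ a b, pvInB g a → pvVGet v a.1 a.2 = true → pvAdj g a b →
        pvVGet v b.1 b.2 = true) →
      (∀ a, pvInB g a → pvVGet v a.1 a.2 = true → pvW g a → pvF g a ≤ acc) →
      (cs.foldl (pvAStep g) (acc, v)).1 = pvSimple g cs acc := by
  intro cs
  induction cs with
  | nil =>
    intro acc v _ _ _ _ _
    simp [pvSimple]
  | cons c cs ih =>
    intro acc v hcs hs hnw hcl hbd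
    have hcIn : pvInB g c := hcs c List.mem_cons_self
    rw [List.foldl_cons]
    cases hv : pvVGet v c.1 c.2 with
    | true =>
      have hstep : pvAStep g (acc, v) c = (acc, v) := by
        simp [pvAStep, hv]
      rw [hstep]
      have hsimp : pvSimple g (c :: cs) acc = pvSimple g cs acc := by
        unfold pvSimple
        rw [List.foldl_cons]
        congr 1
        by_cases hw : pvW g c
        · rw [if_pos hw]
          exact max_eq_left (hbd c hcIn hv hw)
        · rw [if_neg hw]
      rw [hsimp]
      exact ih acc v (fun c' h' => hcs c' (List.mem_cons_of_mem _ h')) hs hnw hcl hbd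
    | false =>
      have hW : pvW g c := by
        by_contra hw
        exact absurd (hnw c hcIn hw) (by simp [hv])
      have hDs : pvDFin g v [c] = pvCompF g c := pvDFin_single g v c hnw hcl hcIn hv
      obtain ⟨hsum, hshape, hvis⟩ := pvBFS_spec g v [c] 0 hs hnw
        (by
          intro e he
          rw [List.mem_singleton] at he
          subst he
          exact hcIn)
      rw [hDs] at hsum hvis
      have hres : (pvBFS g (pvM g) (pvN g) v [c] 0).1 = pvF g c := by
        rw [hsum, pvF]
        ring
      have hstep : pvAStep g (acc, v) c =
          (max acc (pvF g c), (pvBFS g (pvM g) (pvN g) v [c] 0).2) := by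
        simp [pvAStep, hv, hres]
      rw [hstep]
      have hsimp : pvSimple g (c :: cs) acc = pvSimple g cs (max acc (pvF g c)) := by
        unfold pvSimple
        rw [List.foldl_cons, if_pos hW]
      rw [hsimp]
      apply ih
      · exact fun c' h' => hcs c' (List.mem_cons_of_mem _ h')
      · exact hshape
      · intro e he hw
        exact (hvis e he).mpr (Or.inl (hnw e he hw))
      · intro a b ha hva hadj
        rcases (hvis a ha).mp hva with h1 | h2
        · exact (hvis b hadj.2.1.1).mpr (Or.inl (hcl a b ha h1 hadj))
        · rw [mem_pvCompF] at h2
          exact (hvis b hadj.2.1.1).mpr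
            (Or.inr ((mem_pvCompF g c b).mpr ⟨hadj.2.1.1, Relation.ReflTransGen.tail h2.2 hadj⟩))
      · intro a ha hva hw
        rcases (hvis a ha).mp hva with h1 | h2
        · exact le_trans (hbd a ha h1 hw) (le_max_left _ _)
        · rw [mem_pvCompF] at h2
          rw [pvF_eq_of_reach g h2.2]
          exact le_max_right _ _

lemma pvShape_pvVis0 (g : List (List Int)) : pvShape g (pvVis0 g) := by
  constructor
  · simp [pvVis0]
  · intro r hr
    simp only [pvVis0, List.mem_map] at hr
    obtain ⟨i, _, rfl⟩ := hr
    simp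

lemma pvVGet_pvVis0 (g : List (List Int)) (e : Int × Int) (he : pvInB g e) :
    pvVGet (pvVis0 g) e.1 e.2 = (pvGetI g e.1 e.2 == 0) := by
  unfold pvVGet pvVis0
  obtain ⟨h1, h2, h3, h4⟩ := he
  have hi : e.1.toNat < g.length := by
    simp only [pvM] at h2
    omega
  have hj : e.2.toNat < (g.headD []).length := by
    simp only [pvN] at h4
    omega
  have houter : ((List.range g.length).map (fun (i : Nat) =>
      (List.range (g.headD []).length).map
        (fun (j : Nat) => pvGetI g (i : Int) (j : Int) == 0))).getD e.1.toNat [] =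
      (List.range (g.headD []).length).map
        (fun (j : Nat) => pvGetI g ((e.1.toNat : Nat) : Int) (j : Int) == 0) := by
    rw [List.getD_eq_getElem?_getD, List.getElem?_map, List.getElem?_range hi]
    rfl
  rw [houter]
  have hinner : ((List.range (g.headD []).length).map
      (fun (j : Nat) => pvGetI g ((e.1.toNat : Nat) : Int) (j : Int) == 0)).getD e.2.toNat true =
      (pvGetI g (e.1.toNat : Int) (e.2.toNat : Int) == 0) := by
    rw [List.getD_eq_getElem?_getD, List.getElem?_map, List.getElem?_range hj]
    rfl
  rw [hinner, Int.toNat_of_nonneg h1, Int.toNat_of_nonneg h3]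

lemma findMaxFish_eq_fold (g : List (List Int)) :
    findMaxFish g =
      ((pvCellsList g.length (g.headD []).length).foldl (pvAStep g) (0, pvVis0 g)).1 := by
  unfold findMaxFish pvCellsList pvVis0 pvAStep
  rw [List.foldl_flatMap]
  simp only [List.foldl_map]


-- ---- B-side: Union-Find basics ----
abbrev pvIdx (g : List (List Int)) (c : Int × Int) : Int := c.1 * pvN g + c.2

-- parent[x] as read by find (in-range reads only, default irrelevant)
def pvPg (par : List Int) (x : Int) : Int := par.getD x.toNat 0

def pvRoot (par : List Int) (x : Int) : Int := ufFind par par.length x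

abbrev pvInR (par : List Int) (x : Int) : Prop := 0 ≤ x ∧ x.toNat < par.length

-- the union-find invariant: every parent pointer sits at or above its index
def pvUFInv (par : List Int) : Prop :=
  ∀ x : Int, pvInR par x → x ≤ pvPg par x ∧ (pvPg par x).toNat < par.length

def pvPar0 (N : Nat) : List Int := (List.range N).map (fun (k : Nat) => (k : Int))

def pvBuildStep (g : List (List Int)) (par : List Int) (c : Int × Int) : List Int :=
  if pvGetI g c.1 c.2 ≠ 0 then
    let par1 := if c.1 + 1 < pvM g ∧ pvGetI g (c.1 + 1) c.2 ≠ 0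
      then ufUnion par (pvIdx g c) ((c.1 + 1) * pvN g + c.2) else par
    if c.2 + 1 < pvN g ∧ pvGetI g c.1 (c.2 + 1) ≠ 0
      then ufUnion par1 (pvIdx g c) (pvIdx g c + 1) else par1
  else par

def pvSumStep (g : List (List Int)) (par : List Int) (d : PySem.Dict Int Int)
    (c : Int × Int) : PySem.Dict Int Int :=
  if pvGetI g c.1 c.2 ≠ 0 then
    let r := ufFind par par.length (pvIdx g c)
    d.insert r (d.getD r 0 + pvGetI g c.1 c.2)
  else d

lemma ufFind_succ (par : List Int) (fuel : Nat) (x : Int)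
    (hx : 0 ≤ x) (hlen : x.toNat < par.length) :
    ufFind par (fuel + 1) x = if pvPg par x ≠ x then ufFind par fuel (pvPg par x) else x := by
  have hd : par.getD x.toNat x = pvPg par x := by
    rw [pvPg, List.getD_eq_getElem par x hlen, List.getD_eq_getElem par 0 hlen]
  simp only [ufFind, hd]

lemma ufFind_fix (par : List Int) (fuel : Nat) (x : Int) (h : par.getD x.toNat x = x) :
    ufFind par fuel x = x := by
  induction fuel with
  | zero => rfl
  | succ fuel ih =>
    show (if par.getD x.toNat x ≠ x then ufFind par fuel (par.getD x.toNat x) else x) = x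
    rw [if_neg (not_not_intro h)]

lemma ufFind_spec (par : List Int) (hI : pvUFInv par) :
    ∀ (fuel : Nat) (x : Int), pvInR par x → par.length ≤ x.toNat + fuel →
      x ≤ ufFind par fuel x ∧ pvInR par (ufFind par fuel x) ∧
        pvPg par (ufFind par fuel x) = ufFind par fuel x := by
  intro fuel
  induction fuel with
  | zero =>
    intro x hx hfuel
    exact absurd hfuel (by omega)
  | succ fuel ih =>
    intro x hx hfuel
    rw [ufFind_succ par fuel x hx.1 hx.2]
    by_cases hp : pvPg par x = x
    · rw [if_neg (not_not_intro hp)]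
      exact ⟨le_refl x, hx, hp⟩
    · rw [if_pos hp]
      obtain ⟨h1, h2⟩ := hI x hx
      have hlt : x < pvPg par x := lt_of_le_of_ne h1 (Ne.symm hp)
      obtain ⟨ha, hb, hc⟩ := ih (pvPg par x) ⟨by omega, h2⟩ (by omega)
      exact ⟨le_trans (le_of_lt hlt) ha, hb, hc⟩

lemma ufFind_fuel_eq (par : List Int) (hI : pvUFInv par) :
    ∀ (fuel fuel' : Nat) (x : Int), pvInR par x →
      par.length ≤ x.toNat + fuel → par.length ≤ x.toNat + fuel' →
      ufFind par fuel x = ufFind par fuel' x := by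
  intro fuel
  induction fuel with
  | zero =>
    intro fuel' x hx h h'
    exact absurd h (by omega)
  | succ fuel ih =>
    intro fuel' x hx h h'
    cases fuel' with
    | zero => exact absurd h' (by omega)
    | succ fuel' =>
      rw [ufFind_succ par fuel x hx.1 hx.2, ufFind_succ par fuel' x hx.1 hx.2]
      by_cases hp : pvPg par x = x
      · rw [if_neg (not_not_intro hp), if_neg (not_not_intro hp)]
      · rw [if_pos hp, if_pos hp]
        obtain ⟨h1, h2⟩ := hI x hx
        have hlt : x < pvPg par x := lt_of_le_of_ne h1 (Ne.symm hp)
        exact ih fuel' (pvPg par x) ⟨by omega, h2⟩ (by omega) (by omega)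

lemma pvRoot_spec (par : List Int) (hI : pvUFInv par) (x : Int) (hx : pvInR par x) :
    x ≤ pvRoot par x ∧ pvInR par (pvRoot par x) ∧ pvPg par (pvRoot par x) = pvRoot par x := by
  have := ufFind_spec par hI par.length x hx (by omega)
  simpa [pvRoot] using this

lemma pvRoot_fix (par : List Int) (x : Int) (hx : pvInR par x) (h : pvPg par x = x) :
    pvRoot par x = x := by
  unfold pvRoot
  apply ufFind_fix
  rw [pvPg, List.getD_eq_getElem par 0 hx.2] at h
  rw [List.getD_eq_getElem par x hx.2]
  exact h

lemma pvRoot_pg (par : List Int) (hI : pvUFInv par) (x : Int) (hx : pvInR par x) :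
    pvRoot par (pvPg par x) = pvRoot par x := by
  by_cases hp : pvPg par x = x
  · rw [hp]
  · obtain ⟨h1, h2⟩ := hI x hx
    have hlt : x < pvPg par x := lt_of_le_of_ne h1 (Ne.symm hp)
    have hlen1 : 1 ≤ par.length := by omega
    unfold pvRoot
    conv_rhs => rw [show par.length = (par.length - 1) + 1 from by omega]
    rw [ufFind_succ par (par.length - 1) x hx.1 hx.2, if_pos hp]
    exact ufFind_fuel_eq par hI par.length (par.length - 1) (pvPg par x)
      ⟨by omega, h2⟩ (by omega) (by omega)

lemma pvPg_set (par : List Int) (r s x : Int) (hr : 0 ≤ r) (hx : 0 ≤ x)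
    (hrlen : r.toNat < par.length) :
    pvPg (par.set r.toNat s) x = if x = r then s else pvPg par x := by
  unfold pvPg
  rw [pvGetD_set]
  by_cases hxr : x = r
  · subst hxr
    rw [if_pos ⟨rfl, hrlen⟩, if_pos rfl]
  · have hne : r.toNat ≠ x.toNat := by omega
    rw [if_neg (by tauto), if_neg hxr]

lemma pvUFInv_set (par : List Int) (hI : pvUFInv par) (r s : Int)
    (hr : pvInR par r) (hs : pvInR par s) (hrs : r ≤ s) :
    pvUFInv (par.set r.toNat s) := by
  intro x hx
  have hx' : pvInR par x := ⟨hx.1, by simpa using hx.2⟩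
  simp only [List.length_set]
  rw [pvPg_set par r s x hr.1 hx.1 hr.2]
  split_ifs with hxr
  · subst hxr
    exact ⟨hrs, hs.2⟩
  · exact hI x hx' 

lemma pvRoot_set_high (par : List Int) (hI : pvUFInv par) (r s : Int)
    (hr : pvInR par r) (hs : pvInR par s) (hrs : r < s) :
    ∀ (fuel : Nat) (x : Int), pvInR par x → par.length ≤ x.toNat + fuel → r < x →
      pvRoot (par.set r.toNat s) x = pvRoot par x := by
  have hlen : (par.set r.toNat s).length = par.length := by simp
  have hI' : pvUFInv (par.set r.toNat s) := pvUFInv_set par hI r s hr hs (le_of_lt hrs)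
  intro fuel
  induction fuel with
  | zero =>
    intro x hx h hrx
    exact absurd h (by omega)
  | succ fuel ih =>
    intro x hx h hrx
    have hpg : pvPg (par.set r.toNat s) x = pvPg par x := by
      rw [pvPg_set par r s x hr.1 hx.1 hr.2, if_neg (by omega)]
    by_cases hp : pvPg par x = x
    · rw [pvRoot_fix (par.set r.toNat s) x ⟨hx.1, by rw [hlen]; exact hx.2⟩
        (by rw [hpg]; exact hp), pvRoot_fix par x hx hp]
    · obtain ⟨h1, h2⟩ := hI x hx
      have hlt : x < pvPg par x := lt_of_le_of_ne h1 (Ne.symm hp)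
      have e1 : pvRoot (par.set r.toNat s) x = pvRoot (par.set r.toNat s) (pvPg par x) := by
        conv_lhs => rw [← pvRoot_pg (par.set r.toNat s) hI' x ⟨hx.1, by rw [hlen]; exact hx.2⟩]
        rw [hpg]
      have e2 : pvRoot par x = pvRoot par (pvPg par x) := (pvRoot_pg par hI x hx).symm
      rw [e1, e2]
      exact ih (pvPg par x) ⟨by omega, h2⟩ (by omega) (by omega)

lemma pvRoot_set (par : List Int) (hI : pvUFInv par) (r s : Int)
    (hr : pvInR par r) (hs : pvInR par s) (hrs : r < s) (hroot : pvPg par r = r) :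
    ∀ (fuel : Nat) (x : Int), pvInR par x → par.length ≤ x.toNat + fuel →
      pvRoot (par.set r.toNat s) x = if pvRoot par x = r then pvRoot par s else pvRoot par x := by
  have hlen : (par.set r.toNat s).length = par.length := by simp
  have hI' : pvUFInv (par.set r.toNat s) := pvUFInv_set par hI r s hr hs (le_of_lt hrs)
  intro fuel
  induction fuel with
  | zero =>
    intro x hx h
    exact absurd h (by omega)
  | succ fuel ih =>
    intro x hx h
    by_cases hxr : x = r
    · subst hxr
      rw [if_pos (pvRoot_fix par x hx hroot)]
      have hpg' : pvPg (par.set x.toNat s) x = s := by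
        rw [pvPg_set par x s x hx.1 hx.1 hx.2, if_pos rfl]
      have e1 : pvRoot (par.set x.toNat s) s = pvRoot (par.set x.toNat s) x := by
        conv_rhs => rw [← pvRoot_pg (par.set x.toNat s) hI' x ⟨hx.1, by rw [hlen]; exact hx.2⟩]
        rw [hpg']
      have e2 : pvRoot (par.set x.toNat s) s = pvRoot par s :=
        pvRoot_set_high par hI x s hx hs hrs par.length s hs (by omega) hrs
      rw [← e1, e2]
    · have hpg : pvPg (par.set r.toNat s) x = pvPg par x := by
        rw [pvPg_set par r s x hr.1 hx.1 hr.2, if_neg hxr]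
      by_cases hp : pvPg par x = x
      · have hx1 : pvRoot par x = x := pvRoot_fix par x hx hp
        have hx2 : pvRoot (par.set r.toNat s) x = x :=
          pvRoot_fix _ x ⟨hx.1, by rw [hlen]; exact hx.2⟩ (by rw [hpg]; exact hp)
        rw [hx1, hx2, if_neg hxr]
      · obtain ⟨h1, h2⟩ := hI x hx
        have hlt : x < pvPg par x := lt_of_le_of_ne h1 (Ne.symm hp)
        have e1 : pvRoot (par.set r.toNat s) x = pvRoot (par.set r.toNat s) (pvPg par x) := by
          conv_lhs => rw [← pvRoot_pg (par.set r.toNat s) hI' x ⟨hx.1, by rw [hlen]; exact hx.2⟩]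
          rw [hpg]
        have e2 : pvRoot par x = pvRoot par (pvPg par x) := (pvRoot_pg par hI x hx).symm
        rw [e1, e2]
        exact ih (pvPg par x) ⟨by omega, h2⟩ (by omega)

lemma ufUnion_eq (par : List Int) (a b : Int) :
    ufUnion par a b =
      if pvRoot par a < pvRoot par b then par.set (pvRoot par a).toNat (pvRoot par b)
      else if pvRoot par b < pvRoot par a then par.set (pvRoot par b).toNat (pvRoot par a)
      else par := rfl

lemma ufUnion_length (par : List Int) (a b : Int) : (ufUnion par a b).length = par.length := by
  rw [ufUnion_eq]
  split_ifs <;> simp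

lemma ufUnion_inv (par : List Int) (hI : pvUFInv par) (a b : Int)
    (ha : pvInR par a) (hb : pvInR par b) : pvUFInv (ufUnion par a b) := by
  rw [ufUnion_eq]
  obtain ⟨_, hraR, hraF⟩ := pvRoot_spec par hI a ha
  obtain ⟨_, hrbR, hrbF⟩ := pvRoot_spec par hI b hb
  split_ifs with h1 h2
  · exact pvUFInv_set par hI _ _ hraR hrbR (le_of_lt h1)
  · exact pvUFInv_set par hI _ _ hrbR hraR (le_of_lt h2)
  · exact hI

lemma ufUnion_root (par : List Int) (hI : pvUFInv par) (a b : Int)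
    (ha : pvInR par a) (hb : pvInR par b) (x : Int) (hx : pvInR par x) :
    pvRoot (ufUnion par a b) x =
      if pvRoot par x = pvRoot par a ∨ pvRoot par x = pvRoot par b
      then max (pvRoot par a) (pvRoot par b) else pvRoot par x := by
  obtain ⟨_, hraR, hraF⟩ := pvRoot_spec par hI a ha
  obtain ⟨_, hrbR, hrbF⟩ := pvRoot_spec par hI b hb
  rcases lt_trichotomy (pvRoot par a) (pvRoot par b) with h1 | h1 | h1
  · rw [ufUnion_eq, if_pos h1]
    rw [pvRoot_set par hI _ _ hraR hrbR h1 hraF par.length x hx (Nat.le_add_left _ _),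
      pvRoot_fix par _ hrbR hrbF]
    by_cases hc : pvRoot par x = pvRoot par a
    · rw [if_pos hc, if_pos (Or.inl hc), max_eq_right (le_of_lt h1)]
    · rw [if_neg hc]
      by_cases hc2 : pvRoot par x = pvRoot par b
      · rw [if_pos (Or.inr hc2), max_eq_right (le_of_lt h1), hc2]
      · rw [if_neg (by tauto)]
  · rw [ufUnion_eq, if_neg (by omega), if_neg (by omega)]
    by_cases hc : pvRoot par x = pvRoot par a ∨ pvRoot par x = pvRoot par b
    · rw [if_pos hc, h1, max_self]
      rcases hc with hc | hc
      · rw [hc, h1]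
      · exact hc
    · rw [if_neg hc]
  · rw [ufUnion_eq, if_neg (by omega), if_pos h1]
    rw [pvRoot_set par hI _ _ hrbR hraR h1 hrbF par.length x hx (Nat.le_add_left _ _),
      pvRoot_fix par _ hraR hraF]
    by_cases hc : pvRoot par x = pvRoot par b
    · rw [if_pos hc, if_pos (Or.inr hc), max_eq_left (le_of_lt h1)]
    · rw [if_neg hc]
      by_cases hc2 : pvRoot par x = pvRoot par a
      · rw [if_pos (Or.inl hc2), max_eq_left (le_of_lt h1), hc2]
      · rw [if_neg (by tauto)]

-- ---- B-side: grid semantics of the build fold ----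
lemma pvIdx_inj (g : List (List Int)) (c d : Int × Int) (hc : pvInB g c) (hd : pvInB g d)
    (h : pvIdx g c = pvIdx g d) : c = d := by
  obtain ⟨a1, a2, a3, a4⟩ := hc
  obtain ⟨b1, b2, b3, b4⟩ := hd
  have hn0 : (0 : Int) ≤ pvN g := Int.natCast_nonneg _
  simp only [pvIdx] at h
  have hfst : c.1 = d.1 := by
    by_contra hne
    rcases lt_or_gt_of_ne hne with hlt | hlt
    · have h2 : (c.1 + 1) * pvN g ≤ d.1 * pvN g :=
        mul_le_mul_of_nonneg_right (by omega) hn0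
      have h3 : (c.1 + 1) * pvN g = c.1 * pvN g + pvN g := by ring
      linarith
    · have h2 : (d.1 + 1) * pvN g ≤ c.1 * pvN g :=
        mul_le_mul_of_nonneg_right (by omega) hn0
      have h3 : (d.1 + 1) * pvN g = d.1 * pvN g + pvN g := by ring
      linarith
  refine Prod.ext hfst ?_
  rw [hfst] at h
  linarith

lemma pvIdx_bound (g : List (List Int)) (c : Int × Int) (hc : pvInB g c) :
    0 ≤ pvIdx g c ∧ (pvIdx g c).toNat < g.length * (g.headD []).length := by
  obtain ⟨a1, a2, a3, a4⟩ := hc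
  have hn0 : (0 : Int) ≤ pvN g := Int.natCast_nonneg _
  have h0 : 0 ≤ pvIdx g c := add_nonneg (mul_nonneg a1 hn0) a3
  have h1 : c.1 * pvN g ≤ (pvM g - 1) * pvN g := mul_le_mul_of_nonneg_right (by omega) hn0
  have h2 : (pvM g - 1) * pvN g = pvM g * pvN g - pvN g := by ring
  have h3 : pvIdx g c < pvM g * pvN g := by simp only [pvIdx]; linarith
  have h4 : pvM g * pvN g = ((g.length * (g.headD []).length : Nat) : Int) := by push_cast; ring
  rw [h4] at h3
  exact ⟨h0, by omega⟩

-- the global invariant carried through the build fold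
def pvGInv (g : List (List Int)) (par : List Int) : Prop :=
  pvUFInv par ∧ par.length = g.length * (g.headD []).length ∧
    ∀ c d : Int × Int, pvW g c → pvW g d →
      pvRoot par (pvIdx g c) = pvRoot par (pvIdx g d) → pvReach g c d

lemma pvInR_of_InB (g : List (List Int)) (par : List Int)
    (hlen : par.length = g.length * (g.headD []).length) (c : Int × Int) (hc : pvInB g c) :
    pvInR par (pvIdx g c) := by
  obtain ⟨h0, h1⟩ := pvIdx_bound g c hc
  exact ⟨h0, by rw [hlen]; exact h1⟩

lemma ufUnion_GInv (g : List (List Int)) (par : List Int) (hG : pvGInv g par)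
    (c d : Int × Int) (hadj : pvAdj g c d) :
    pvGInv g (ufUnion par (pvIdx g c) (pvIdx g d)) ∧
      (∀ x y : Int, pvInR par x → pvInR par y → pvRoot par x = pvRoot par y →
        pvRoot (ufUnion par (pvIdx g c) (pvIdx g d)) x =
          pvRoot (ufUnion par (pvIdx g c) (pvIdx g d)) y) ∧
      pvRoot (ufUnion par (pvIdx g c) (pvIdx g d)) (pvIdx g c) =
        pvRoot (ufUnion par (pvIdx g c) (pvIdx g d)) (pvIdx g d) := by
  obtain ⟨hUF, hlen, hFwd⟩ := hG
  have hcB : pvInB g c := hadj.1.1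
  have hdB : pvInB g d := hadj.2.1.1
  have hic := pvInR_of_InB g par hlen c hcB
  have hid := pvInR_of_InB g par hlen d hdB
  have hroot := fun x hx => ufUnion_root par hUF (pvIdx g c) (pvIdx g d) hic hid x hx
  have hlen' : (ufUnion par (pvIdx g c) (pvIdx g d)).length = par.length :=
    ufUnion_length par _ _
  have hreach_of : ∀ z : Int × Int, pvW g z →
      (pvRoot par (pvIdx g z) = pvRoot par (pvIdx g c) ∨
        pvRoot par (pvIdx g z) = pvRoot par (pvIdx g d)) → pvReach g z c := by
    intro z hwz hcase
    rcases hcase with hcase | hcase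
    · exact hFwd z c hwz hadj.1 hcase
    · exact Relation.ReflTransGen.tail (hFwd z d hwz hadj.2.1 hcase) (pvAdj_symm g hadj)
  refine ⟨⟨ufUnion_inv par hUF _ _ hic hid, by rw [hlen']; exact hlen, ?_⟩, ?_, ?_⟩
  · intro x y hwx hwy hxy
    have hxI := pvInR_of_InB g par hlen x hwx.1
    have hyI := pvInR_of_InB g par hlen y hwy.1
    rw [hroot _ hxI, hroot _ hyI] at hxy
    by_cases p1 : pvRoot par (pvIdx g x) = pvRoot par (pvIdx g c) ∨
        pvRoot par (pvIdx g x) = pvRoot par (pvIdx g d)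
    · by_cases p2 : pvRoot par (pvIdx g y) = pvRoot par (pvIdx g c) ∨
          pvRoot par (pvIdx g y) = pvRoot par (pvIdx g d)
      · exact Relation.ReflTransGen.trans (hreach_of x hwx p1)
          (pvReach_symm g (hreach_of y hwy p2))
      · rw [if_pos p1, if_neg p2] at hxy
        rcases max_choice (pvRoot par (pvIdx g c)) (pvRoot par (pvIdx g d)) with hm | hm <;>
          rw [hm] at hxy <;> exact absurd hxy.symm (by tauto)
    · by_cases p2 : pvRoot par (pvIdx g y) = pvRoot par (pvIdx g c) ∨
          pvRoot par (pvIdx g y) = pvRoot par (pvIdx g d)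
      · rw [if_neg p1, if_pos p2] at hxy
        rcases max_choice (pvRoot par (pvIdx g c)) (pvRoot par (pvIdx g d)) with hm | hm <;>
          rw [hm] at hxy <;> exact absurd hxy (by tauto)
      · rw [if_neg p1, if_neg p2] at hxy
        exact hFwd x y hwx hwy hxy
  · intro x y hx hy hxy
    rw [hroot _ hx, hroot _ hy, hxy]
  · rw [hroot _ hic, hroot _ hid, if_pos (Or.inl rfl), if_pos (Or.inr rfl)]

lemma pvStage (g : List (List Int)) (par : List Int) (hG : pvGInv g par)
    (c d : Int × Int) (cond : Prop) [Decidable cond]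
    (hcd : cond → pvAdj g c d) (b : Int) (hb : b = pvIdx g d) :
    pvGInv g (if cond then ufUnion par (pvIdx g c) b else par) ∧
      (∀ x y : Int, pvInR par x → pvInR par y → pvRoot par x = pvRoot par y →
        pvRoot (if cond then ufUnion par (pvIdx g c) b else par) x =
          pvRoot (if cond then ufUnion par (pvIdx g c) b else par) y) ∧
      (cond → pvRoot (if cond then ufUnion par (pvIdx g c) b else par) (pvIdx g c) =
        pvRoot (if cond then ufUnion par (pvIdx g c) b else par) (pvIdx g d)) := by
  by_cases h : cond
  · rw [if_pos h, hb]
    obtain ⟨hGu, hmono, hedge⟩ := ufUnion_GInv g par hG c d (hcd h)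
    exact ⟨hGu, hmono, fun _ => hedge⟩
  · rw [if_neg h]
    exact ⟨hG, fun x y _ _ hxy => hxy, fun hcond => absurd hcond h⟩

lemma pvBuildStep_spec (g : List (List Int)) (par : List Int) (hG : pvGInv g par)
    (c : Int × Int) (hc : pvInB g c) :
    pvGInv g (pvBuildStep g par c) ∧
      (∀ x y : Int, pvInR par x → pvInR par y → pvRoot par x = pvRoot par y →
        pvRoot (pvBuildStep g par c) x = pvRoot (pvBuildStep g par c) y) ∧
      (∀ d : Int × Int, pvW g c → pvW g d →
        (d = (c.1 + 1, c.2) ∨ d = (c.1, c.2 + 1)) → pvInB g d →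
        pvRoot (pvBuildStep g par c) (pvIdx g c) = pvRoot (pvBuildStep g par c) (pvIdx g d)) := by
  by_cases hw : pvGetI g c.1 c.2 ≠ 0
  · have hWc : pvW g c := ⟨hc, hw⟩
    obtain ⟨hcA, hcB, hcC, hcD⟩ := hc
    have hb1 : (c.1 + 1) * pvN g + c.2 = pvIdx g ((c.1 + 1, c.2) : Int × Int) := rfl
    have hb2 : pvIdx g c + 1 = pvIdx g ((c.1, c.2 + 1) : Int × Int) := by
      simp only [pvIdx]
      ring
    have hadj1 : (c.1 + 1 < pvM g ∧ pvGetI g (c.1 + 1) c.2 ≠ 0) →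
        pvAdj g c (c.1 + 1, c.2) := by
      intro h1
      refine ⟨hWc, ⟨⟨by omega, h1.1, hcC, hcD⟩, h1.2⟩, (1, 0), by simp [pvDirs], ?_⟩
      rw [Prod.ext_iff]
      constructor <;> dsimp only <;> omega
    have hadj2 : (c.2 + 1 < pvN g ∧ pvGetI g c.1 (c.2 + 1) ≠ 0) →
        pvAdj g c (c.1, c.2 + 1) := by
      intro h2
      refine ⟨hWc, ⟨⟨hcA, hcB, by omega, h2.1⟩, h2.2⟩, (0, 1), by simp [pvDirs], ?_⟩
      rw [Prod.ext_iff]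
      constructor <;> dsimp only <;> omega
    obtain ⟨hG1, hmono1, hedge1⟩ :=
      pvStage g par hG c (c.1 + 1, c.2) _ hadj1 ((c.1 + 1) * pvN g + c.2) hb1.symm
    set P1 := if c.1 + 1 < pvM g ∧ pvGetI g (c.1 + 1) c.2 ≠ 0
      then ufUnion par (pvIdx g c) ((c.1 + 1) * pvN g + c.2) else par with hP1
    obtain ⟨hG2, hmono2, hedge2⟩ :=
      pvStage g P1 hG1 c (c.1, c.2 + 1) _ hadj2 (pvIdx g c + 1) hb2
    have hred : pvBuildStep g par c =
        (if c.2 + 1 < pvN g ∧ pvGetI g c.1 (c.2 + 1) ≠ 0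
          then ufUnion P1 (pvIdx g c) (pvIdx g c + 1) else P1) := by
      unfold pvBuildStep
      rw [if_pos hw]
    have hlen0 := hG.2.1
    have hlen1 := hG1.2.1
    have hInR1 : ∀ x : Int, pvInR par x → pvInR P1 x :=
      fun x hx => ⟨hx.1, by rw [hlen1, ← hlen0]; exact hx.2⟩
    rw [hred]
    refine ⟨hG2, ?_, ?_⟩
    · intro x y hx hy hxy
      exact hmono2 x y (hInR1 x hx) (hInR1 y hy) (hmono1 x y hx hy hxy)
    · intro d _ hWd hdir hInBd
      rcases hdir with rfl | rfl
      · have hcond1 : c.1 + 1 < pvM g ∧ pvGetI g (c.1 + 1) c.2 ≠ 0 :=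
          ⟨hWd.1.2.1, hWd.2⟩
        exact hmono2 _ _ (pvInR_of_InB g P1 hlen1 c ⟨hcA, hcB, hcC, hcD⟩)
          (pvInR_of_InB g P1 hlen1 _ hWd.1) (hedge1 hcond1)
      · have hcond2 : c.2 + 1 < pvN g ∧ pvGetI g c.1 (c.2 + 1) ≠ 0 :=
          ⟨hWd.1.2.2.2, hWd.2⟩
        exact hedge2 hcond2
  · have hstep : pvBuildStep g par c = par := by
      unfold pvBuildStep
      rw [if_neg hw]
    rw [hstep]
    exact ⟨hG, fun x y _ _ h => h, fun d hWc _ _ _ => absurd hWc.2 hw⟩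

lemma pvBuild_fold (g : List (List Int)) :
    ∀ (cs : List (Int × Int)) (par : List Int), pvGInv g par → (∀ c ∈ cs, pvInB g c) →
      pvGInv g (cs.foldl (pvBuildStep g) par) ∧
        (∀ x y : Int, pvInR par x → pvInR par y → pvRoot par x = pvRoot par y →
          pvRoot (cs.foldl (pvBuildStep g) par) x = pvRoot (cs.foldl (pvBuildStep g) par) y) ∧
        (∀ c ∈ cs, ∀ d : Int × Int, pvW g c → pvW g d →
          (d = (c.1 + 1, c.2) ∨ d = (c.1, c.2 + 1)) → pvInB g d →
          pvRoot (cs.foldl (pvBuildStep g) par) (pvIdx g c) =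
            pvRoot (cs.foldl (pvBuildStep g) par) (pvIdx g d)) := by
  intro cs
  induction cs with
  | nil =>
    intro par hG hcs
    refine ⟨hG, fun x y _ _ h => h, ?_⟩
    intro c hc
    simp at hc
  | cons c cs ih =>
    intro par hG hcs
    rw [List.foldl_cons]
    obtain ⟨hG1, hmono1, hedge1⟩ := pvBuildStep_spec g par hG c (hcs c List.mem_cons_self)
    obtain ⟨hG2, hmono2, hedge2⟩ := ih (pvBuildStep g par c) hG1
      (fun c' h' => hcs c' (List.mem_cons_of_mem _ h'))
    have hlen0 := hG.2.1
    have hlen1 := hG1.2.1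
    have hInR1 : ∀ x : Int, pvInR par x → pvInR (pvBuildStep g par c) x :=
      fun x hx => ⟨hx.1, by rw [hlen1, ← hlen0]; exact hx.2⟩
    refine ⟨hG2, ?_, ?_⟩
    · intro x y hx hy hxy
      exact hmono2 x y (hInR1 x hx) (hInR1 y hy) (hmono1 x y hx hy hxy)
    · intro c' hc' d hWc' hWd hdir hInBd
      rcases List.mem_cons.mp hc' with rfl | hmem
      · exact hmono2 _ _ (pvInR_of_InB g _ hlen1 _ hWc'.1) (pvInR_of_InB g _ hlen1 _ hWd.1)
          (hedge1 d hWc' hWd hdir hInBd)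
      · exact hedge2 c' hmem d hWc' hWd hdir hInBd

lemma pvGInv_par0 (g : List (List Int)) : pvGInv g (pvPar0 (g.length * (g.headD []).length)) := by
  have hlen : (pvPar0 (g.length * (g.headD []).length)).length =
      g.length * (g.headD []).length := by
    simp [pvPar0]
  have hpg : ∀ x : Int, 0 ≤ x → x.toNat < g.length * (g.headD []).length →
      pvPg (pvPar0 (g.length * (g.headD []).length)) x = x := by
    intro x hx hlt
    have hlt' : x.toNat < (pvPar0 (g.length * (g.headD []).length)).length := by
      rw [hlen]; exact hlt
    have hget : (pvPar0 (g.length * (g.headD []).length))[x.toNat]'hlt' =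
        ((x.toNat : Nat) : Int) := by
      simp only [pvPar0, List.getElem_map, List.getElem_range]
    unfold pvPg
    rw [List.getD_eq_getElem _ 0 hlt', hget]
    omega
  refine ⟨?_, hlen, ?_⟩
  · intro x hx
    have hx2 : x.toNat < g.length * (g.headD []).length := by rw [← hlen]; exact hx.2
    rw [hpg x hx.1 hx2]
    exact ⟨le_refl x, by rw [hlen]; exact hx2⟩
  · intro c d hWc hWd hroot
    have hic := pvInR_of_InB g _ hlen c hWc.1
    have hid := pvInR_of_InB g _ hlen d hWd.1
    have hc' : pvRoot (pvPar0 (g.length * (g.headD []).length)) (pvIdx g c) = pvIdx g c :=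
      pvRoot_fix _ _ hic (hpg _ hic.1 (by rw [← hlen]; exact hic.2))
    have hd' : pvRoot (pvPar0 (g.length * (g.headD []).length)) (pvIdx g d) = pvIdx g d :=
      pvRoot_fix _ _ hid (hpg _ hid.1 (by rw [← hlen]; exact hid.2))
    rw [hc', hd'] at hroot
    rw [pvIdx_inj g c d hWc.1 hWd.1 hroot]
    exact Relation.ReflTransGen.refl

-- the parent array after the whole build fold
def pvParF (g : List (List Int)) : List Int :=
  (pvCellsList g.length (g.headD []).length).foldl (pvBuildStep g)
    (pvPar0 (g.length * (g.headD []).length))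

lemma pvParF_GInv (g : List (List Int)) : pvGInv g (pvParF g) := by
  unfold pvParF
  exact (pvBuild_fold g _ _ (pvGInv_par0 g)
    (fun c hc => (mem_pvCellsList _ _ c).mp hc)).1

-- root equality = connectivity, for water cells, after the build fold
lemma pvRoot_iff_reach (g : List (List Int)) (c d : Int × Int) (hc : pvW g c) (hd : pvW g d) :
    pvRoot (pvParF g) (pvIdx g c) = pvRoot (pvParF g) (pvIdx g d) ↔ pvReach g c d := by
  constructor
  · exact fun h => (pvParF_GInv g).2.2 c d hc hd h
  · intro hr
    have hedge := (pvBuild_fold g (pvCellsList g.length (g.headD []).length) _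
      (pvGInv_par0 g) (fun c' hc' => (mem_pvCellsList _ _ c').mp hc')).2.2
    have hadj_root : ∀ a b : Int × Int, pvAdj g a b →
        pvRoot (pvParF g) (pvIdx g a) = pvRoot (pvParF g) (pvIdx g b) := by
      intro a b hab
      unfold pvParF
      obtain ⟨hWa, hWb, dd, hdd, hd⟩ := hab
      have hmem : ∀ z : Int × Int, pvInB g z →
          z ∈ pvCellsList g.length (g.headD []).length :=
        fun z hz => (mem_pvCellsList _ _ z).mpr hz
      simp only [pvDirs, List.mem_cons, List.not_mem_nil, or_false] at hdd
      rcases hdd with rfl | rfl | rfl | rfl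
      · have hb' : b = (a.1, a.2 + 1) := by
          subst hd
          rw [Prod.ext_iff]
          constructor <;> dsimp only <;> omega
        exact hedge a (hmem a hWa.1) b hWa hWb (Or.inr hb') hWb.1
      · have ha' : a = (b.1, b.2 + 1) := by
          subst hd
          rw [Prod.ext_iff]
          constructor <;> dsimp only <;> omega
        exact (hedge b (hmem b hWb.1) a hWb hWa (Or.inr ha') hWa.1).symm
      · have hb' : b = (a.1 + 1, a.2) := by
          subst hd
          rw [Prod.ext_iff]
          constructor <;> dsimp only <;> omega
        exact hedge a (hmem a hWa.1) b hWa hWb (Or.inl hb') hWb.1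
      · have ha' : a = (b.1 + 1, b.2) := by
          subst hd
          rw [Prod.ext_iff]
          constructor <;> dsimp only <;> omega
        exact (hedge b (hmem b hWb.1) a hWb hWa (Or.inl ha') hWa.1).symm
    have key : ∀ e : Int × Int, pvReach g c e →
        pvRoot (pvParF g) (pvIdx g c) = pvRoot (pvParF g) (pvIdx g e) := by
      intro e he
      induction he with
      | refl => rfl
      | tail h1 h2 ih => exact ih.trans (hadj_root _ _ h2)
    exact key d hr

-- ---- B-side: the aggregation fold ----
lemma pvSum_fold (g : List (List Int)) :
    ∀ (cs done : List (Int × Int)) (dict : PySem.Dict Int Int),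
      (∀ c ∈ cs, pvInB g c) →
      dict.keys.Nodup →
      (∀ r : Int, r ∈ dict.keys ↔ ∃ c ∈ done, pvW g c ∧ pvRoot (pvParF g) (pvIdx g c) = r) →
      (∀ r : Int, dict.getD r 0 =
        ((done.filter (fun c => decide (pvW g c ∧ pvRoot (pvParF g) (pvIdx g c) = r))).map
          (fun c => pvGetI g c.1 c.2)).sum) →
      (cs.foldl (pvSumStep g (pvParF g)) dict).keys.Nodup ∧
        (∀ r : Int, r ∈ (cs.foldl (pvSumStep g (pvParF g)) dict).keys ↔
          ∃ c ∈ done ++ cs, pvW g c ∧ pvRoot (pvParF g) (pvIdx g c) = r) ∧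
        (∀ r : Int, (cs.foldl (pvSumStep g (pvParF g)) dict).getD r 0 =
          (((done ++ cs).filter
            (fun c => decide (pvW g c ∧ pvRoot (pvParF g) (pvIdx g c) = r))).map
            (fun c => pvGetI g c.1 c.2)).sum) := by
  intro cs
  induction cs with
  | nil =>
    intro done dict hcs hnd hkeys hgetD
    simp only [List.foldl_nil, List.append_nil]
    exact ⟨hnd, hkeys, hgetD⟩
  | cons c cs ih =>
    intro done dict hcs hnd hkeys hgetD
    rw [List.foldl_cons]
    have hcIn : pvInB g c := hcs c List.mem_cons_self
    have hassoc : done ++ c :: cs = (done ++ [c]) ++ cs := by simp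
    rw [hassoc]
    by_cases hw : pvGetI g c.1 c.2 ≠ 0
    · have hWc : pvW g c := ⟨hcIn, hw⟩
      have hstep : pvSumStep g (pvParF g) dict c =
          dict.insert (pvRoot (pvParF g) (pvIdx g c))
            (dict.getD (pvRoot (pvParF g) (pvIdx g c)) 0 + pvGetI g c.1 c.2) := by
        unfold pvSumStep
        rw [if_pos hw]
        rfl
      rw [hstep]
      apply ih (done ++ [c]) _ (fun c' h' => hcs c' (List.mem_cons_of_mem _ h'))
      · exact PySem.Dict.nodup_keys_insert _ _ _ hnd
      · intro r
        rw [PySem.Dict.mem_keys_insert]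
        constructor
        · rintro (rfl | hr)
          · exact ⟨c, by simp, hWc, rfl⟩
          · obtain ⟨c', hc', hx⟩ := (hkeys r).mp hr
            exact ⟨c', List.mem_append_left _ hc', hx⟩
        · rintro ⟨c', hc', hWc', hr⟩
          rcases List.mem_append.mp hc' with h | h
          · exact Or.inr ((hkeys r).mpr ⟨c', h, hWc', hr⟩)
          · rw [List.mem_singleton] at h
            subst h
            exact Or.inl hr.symm
      · intro r
        rw [PySem.Dict.getD_insert, List.filter_append, List.map_append, List.sum_append,
          ← hgetD r]
        split_ifs with hrr
        · subst hrr
          have hfil : List.filter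
              (fun c' => decide (pvW g c' ∧ pvRoot (pvParF g) (pvIdx g c') =
                pvRoot (pvParF g) (pvIdx g c))) [c] = [c] := by
            simp [hWc]
          rw [hfil]
          simp
        · have hrr' : ¬ (pvRoot (pvParF g) (pvIdx g c) = r) := fun h => hrr h.symm
          have hfil : List.filter
              (fun c' => decide (pvW g c' ∧ pvRoot (pvParF g) (pvIdx g c') = r)) [c] = [] := by
            simp [hrr']
          rw [hfil]
          simp
    · have h0 : pvGetI g c.1 c.2 = 0 := not_not.mp hw
      have hstep : pvSumStep g (pvParF g) dict c = dict := by
        unfold pvSumStep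
        rw [if_neg hw]
      rw [hstep]
      apply ih (done ++ [c]) dict (fun c' h' => hcs c' (List.mem_cons_of_mem _ h')) hnd
      · intro r
        rw [hkeys r]
        constructor
        · rintro ⟨c', h, hx⟩
          exact ⟨c', List.mem_append_left _ h, hx⟩
        · rintro ⟨c', hc', hWc', hr⟩
          rcases List.mem_append.mp hc' with h | h
          · exact ⟨c', h, hWc', hr⟩
          · rw [List.mem_singleton] at h
            subst h
            exact absurd hWc'.2 hw
      · intro r
        rw [hgetD r, List.filter_append]
        have hfil : List.filter
            (fun c' => decide (pvW g c' ∧ pvRoot (pvParF g) (pvIdx g c') = r)) [c] = [] := by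
          simp [h0]
        rw [hfil]
        simp

lemma pvCellsList_nodup (m n : Nat) : (pvCellsList m n).Nodup := by
  unfold pvCellsList
  rw [List.nodup_flatMap]
  constructor
  · intro i _
    exact List.Nodup.map (fun a b h => by
      have := congrArg Prod.snd h
      dsimp only at this
      exact_mod_cast this) List.nodup_range
  · apply List.Pairwise.imp ?_ (List.pairwise_lt_range (n := m))
    intro a b hab p hpa hpb
    rw [List.mem_map] at hpa hpb
    obtain ⟨j1, _, rfl⟩ := hpa
    obtain ⟨j2, _, h2⟩ := hpb
    have hba : b = a := by
      have := congrArg Prod.fst h2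
      dsimp only at this
      exact_mod_cast this
    omega

-- the per-root accumulated sum is the component sum
lemma pvSlist_eq_pvF (g : List (List Int)) (c : Int × Int) (hc : pvW g c) :
    (((pvCellsList g.length (g.headD []).length).filter
      (fun d => decide (pvW g d ∧ pvRoot (pvParF g) (pvIdx g d) = pvRoot (pvParF g) (pvIdx g c)))).map
      (fun d => pvGetI g d.1 d.2)).sum = pvF g c := by
  have hnd : ((pvCellsList g.length (g.headD []).length).filter
      (fun d => decide (pvW g d ∧ pvRoot (pvParF g) (pvIdx g d) =
        pvRoot (pvParF g) (pvIdx g c)))).Nodup :=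
    (pvCellsList_nodup _ _).filter _
  have hTF : ((pvCellsList g.length (g.headD []).length).filter
      (fun d => decide (pvW g d ∧ pvRoot (pvParF g) (pvIdx g d) =
        pvRoot (pvParF g) (pvIdx g c)))).toFinset = pvCompF g c := by
    apply Finset.ext
    intro d
    rw [List.mem_toFinset, List.mem_filter, mem_pvCompF]
    constructor
    · rintro ⟨hmem, hp⟩
      have hp' : pvW g d ∧ pvRoot (pvParF g) (pvIdx g d) = pvRoot (pvParF g) (pvIdx g c) :=
        of_decide_eq_true hp
      exact ⟨hp'.1.1, pvReach_symm g ((pvRoot_iff_reach g d c hp'.1 hc).mp hp'.2)⟩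
    · rintro ⟨hInB, hreach⟩
      have hWd : pvW g d := pvReach_W g hc hreach
      refine ⟨(mem_pvCellsList _ _ d).mpr hInB, decide_eq_true ?_⟩
      exact ⟨hWd, (pvRoot_iff_reach g d c hWd hc).mpr (pvReach_symm g hreach)⟩
  rw [pvF, ← hTF]
  exact (List.sum_toFinset _ hnd).symm

-- ---- B-side: final max over values ----
lemma foldl_max_withBot (l : List Int) (a : Int) :
    ((l.foldl (fun best s => max best s) a : Int) : WithBot Int) =
      (a : WithBot Int) ⊔ l.toFinset.sup (fun x => (x : WithBot Int)) := by
  induction l generalizing a with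
  | nil => simp
  | cons x l ih =>
    rw [List.foldl_cons, ih, List.toFinset_cons, Finset.sup_insert]
    have hmax : ((max a x : Int) : WithBot Int) = (a : WithBot Int) ⊔ (x : WithBot Int) := by
      rcases le_total a x with h | h
      · rw [max_eq_right h, sup_eq_right.mpr (by exact_mod_cast h)]
      · rw [max_eq_left h, sup_eq_left.mpr (by exact_mod_cast h)]
    rw [hmax, sup_assoc]

lemma foldl_max_toFinset_eq (l1 l2 : List Int) (a : Int) (h : l1.toFinset = l2.toFinset) :
    l1.foldl (fun best s => max best s) a = l2.foldl (fun best s => max best s) a := by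
  have h1 := foldl_max_withBot l1 a
  have h2 := foldl_max_withBot l2 a
  rw [h] at h1
  exact WithBot.coe_injective (h1.trans h2.symm)

lemma pvSimple_eq_max_fold (g : List (List Int)) :
    ∀ (cs : List (Int × Int)) (acc : Int),
      pvSimple g cs acc =
        ((cs.filter (fun c => decide (pvW g c))).map (pvF g)).foldl
          (fun best s => max best s) acc := by
  intro cs
  induction cs with
  | nil =>
    intro acc
    simp [pvSimple]
  | cons c cs ih =>
    intro acc
    by_cases hw : pvW g c
    · have hred : pvSimple g (c :: cs) acc = pvSimple g cs (max acc (pvF g c)) := by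
        unfold pvSimple
        rw [List.foldl_cons, if_pos hw]
      have hfil : List.filter (fun c => decide (pvW g c)) (c :: cs) =
          c :: List.filter (fun c => decide (pvW g c)) cs := by
        simp [List.filter_cons, hw]
      rw [hred, ih, hfil, List.map_cons, List.foldl_cons]
    · have hred : pvSimple g (c :: cs) acc = pvSimple g cs acc := by
        unfold pvSimple
        rw [List.foldl_cons, if_neg hw]
      have hfil : List.filter (fun c => decide (pvW g c)) (c :: cs) =
          List.filter (fun c => decide (pvW g c)) cs := by
        simp [List.filter_cons, hw]
      rw [hred, ih, hfil]

lemma findMaxFish_alt_eq_fold (g : List (List Int)) :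
    findMaxFish_alt g =
      ((pvCellsList g.length (g.headD []).length).foldl
        (pvSumStep g (pvParF g)) PySem.Dict.empty).values.foldl
        (fun best s => max best s) 0 := by
  simp only [findMaxFish_alt, pvParF, pvSumStep, pvBuildStep, pvCellsList, pvPar0, pvIdx,
    List.foldl_flatMap, List.foldl_map]

lemma findMaxFish_alt_eq_simple (g : List (List Int)) :
    findMaxFish_alt g = pvSimple g (pvCellsList g.length (g.headD []).length) 0 := by
  obtain ⟨hnd, hkeys, hgetD⟩ := pvSum_fold g (pvCellsList g.length (g.headD []).length) []
    PySem.Dict.empty (fun c hc => (mem_pvCellsList _ _ c).mp hc)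
    (by simp [PySem.Dict.keys_empty])
    (by intro r; simp [PySem.Dict.keys_empty])
    (by intro r; simp [PySem.Dict.getD_empty])
  simp only [List.nil_append] at hkeys hgetD
  rw [findMaxFish_alt_eq_fold, pvSimple_eq_max_fold]
  apply foldl_max_toFinset_eq
  rw [PySem.Dict.values_eq_map_keys _ hnd 0]
  apply Finset.ext
  intro v
  rw [List.mem_toFinset, List.mem_toFinset, List.mem_map, List.mem_map]
  constructor
  · rintro ⟨r, hr, rfl⟩
    obtain ⟨c, hcmem, hWc, hrc⟩ := (hkeys r).mp hr
    refine ⟨c, List.mem_filter.mpr ⟨hcmem, decide_eq_true hWc⟩, ?_⟩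
    rw [hgetD r, ← hrc]
    exact (pvSlist_eq_pvF g c hWc).symm
  · rintro ⟨c, hcmem, rfl⟩
    obtain ⟨hcin, hWcb⟩ := List.mem_filter.mp hcmem
    have hWc : pvW g c := of_decide_eq_true hWcb
    refine ⟨pvRoot (pvParF g) (pvIdx g c), (hkeys _).mpr ⟨c, hcin, hWc, rfl⟩, ?_⟩
    rw [hgetD]
    exact pvSlist_eq_pvF g c hWc

-- ===== VERDICT (by name: the statement is the Claim_ definition above) =====
theorem findMaxFish_spec : Claim_equal_findMaxFish := by
  intro g _ _
  unfold Spec_findMaxFish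
  rw [findMaxFish_eq_fold, findMaxFish_alt_eq_simple]
  exact foldA_eq_simple g _ 0 _ (fun c hc => (mem_pvCellsList _ _ c).mp hc)
    (pvShape_pvVis0 g)
    (fun e he hw => by
      have h0 := pvVGet_pvVis0 g e he
      simp only [pvW, not_and, ne_eq, not_not] at hw
      simp [h0, hw he])
    (fun a b ha hv hadj => by
      have h0 := pvVGet_pvVis0 g a ha
      rw [h0] at hv
      exact absurd hadj.1.2 (by simpa using hv))
    (fun a ha hv hw => by
      have h0 := pvVGet_pvVis0 g a ha
      rw [h0] at hv
      exact absurd hw.2 (by simpa using hv))
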